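-- pv_equiv track=rewrite | github.com/azadastro/adc | 2025/8.py | merge_circuts
-- ===== SOURCE A (Python) =====
-- def merge_circuts(circuits):
--     while True:
--         new_circuits = []
--         seen = []
--         for i in range(len(circuits)):
--             c_1 = circuits[i]
--             if c_1 in seen:continue
--             for j in range(i+1, len(circuits)):
--                 c_2 = circuits[j]
--                 if any(c in c_1 for c in c_2):
--                     c_1 = c_1.union(c_2)
--                     seen.append(c_2)
--             new_circuits.append(c_1)
--         if len(new_circuits) == len(circuits): break
--         circuits = new_circuits
--
--     new_circuits.sort(key=lambda x: -len(x))
--     return new_circuits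
-- ===== SOURCE B (Python) =====
-- def merge_circuts(circuits):
--     out = []
--     rest = list(circuits)
--     while rest:
--         c = rest[0]
--         rest = rest[1:]
--         changed = True
--         while changed:
--             changed = False
--             keep = []
--             for s in rest:
--                 if c & s:
--                     c = c | s
--                     changed = True
--                 else:
--                     keep.append(s)
--             rest = keep
--         out.append(c)
--     out.sort(key=lambda x: -len(x))
--     return out
-- ===== Notes on version B (the rewrite author's own statement) =====
-- stated objective: alternative
-- what changed: A repeats full O(n^2) merge passes over the whole list (with a 'seen' duplicate filter) until the length stabilizes; B makes a single sweep that pops each seed circuit and saturates it against the shrinking remainder, so every circuit is visited once per component instead of once per global pass.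
import Mathlib
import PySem

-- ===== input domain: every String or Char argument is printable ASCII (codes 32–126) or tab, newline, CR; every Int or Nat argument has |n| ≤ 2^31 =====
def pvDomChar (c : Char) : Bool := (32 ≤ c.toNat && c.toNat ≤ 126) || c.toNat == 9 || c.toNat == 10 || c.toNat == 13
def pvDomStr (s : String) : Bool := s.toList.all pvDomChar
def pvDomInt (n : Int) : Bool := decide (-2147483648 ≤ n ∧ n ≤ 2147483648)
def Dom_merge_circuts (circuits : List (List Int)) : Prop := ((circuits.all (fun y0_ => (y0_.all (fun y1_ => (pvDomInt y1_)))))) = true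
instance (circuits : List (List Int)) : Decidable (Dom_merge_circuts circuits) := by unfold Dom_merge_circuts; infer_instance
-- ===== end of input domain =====

-- B replaces A's repeated global merge passes by a single per-seed saturation sweep (objective: alternative);
-- returned sets are canonicalized to ascending element order in both ports, since Python's set iteration order is not
-- modelled by PySem (outputs are compared as sets there).

-- ===== PORT A =====

-- any(c in c_1 for c in c_2)
def pvTouch (c1 c2 : List Int) : Bool := c2.any (fun c => c1.contains c)

-- the inner 'for j in range(i+1, len(circuits))' loop: grow c_1, recording absorbed circuits in seen
def pvAbsorb (c1 : List Int) (rest : List (List Int)) (seen : List (List Int)) :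
    List Int × List (List Int) :=
  match rest with
  | [] => (c1, seen)
  | c2 :: rs =>
    if pvTouch c1 c2 then pvAbsorb (PySem.Set.union c1 c2) rs (seen ++ [c2])
    else pvAbsorb c1 rs seen

-- one 'for i in range(len(circuits))' pass ('c_1 in seen' is Python set equality)
def pvPass (circuits : List (List Int)) (seen : List (List Int)) : List (List Int) :=
  match circuits with
  | [] => []
  | c1 :: rest =>
    if seen.any (fun t => PySem.Set.equal t c1) then pvPass rest seen
    else
      let p := pvAbsorb c1 rest seen
      p.1 :: pvPass rest p.2

-- termination fact the while-loop recursion cites: a pass never lengthens the list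
theorem pvPass_length_le (circuits seen : List (List Int)) :
    (pvPass circuits seen).length ≤ circuits.length := by
  induction circuits generalizing seen with
  | nil => simp [pvPass]
  | cons c1 rest ih =>
    simp only [pvPass]
    split
    · exact Nat.le_succ_of_le (ih seen)
    · simpa using Nat.succ_le_succ (ih _)

-- the 'while True' loop: repeat the pass until the length no longer shrinks
def pvLoop (circuits : List (List Int)) : List (List Int) :=
  let new := pvPass circuits []
  if h : new.length = circuits.length then new
  else pvLoop new
termination_by circuits.length
decreasing_by
  exact Nat.lt_of_le_of_ne (pvPass_length_le circuits []) h

-- canonical representation of a returned set: its elements in ascending order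
def pvCanon (s : List Int) : List Int := PySem.List.sorted s (fun x => x) false

def merge_circuts (circuits : List (List Int)) : List (List Int) :=
  PySem.List.sorted ((pvLoop circuits).map pvCanon) (fun x => -(x.length : Int)) false

-- ===== PORT B =====

-- 'c & s' is truthy  (nonempty intersection)
def pvInter (c s : List Int) : Bool := !(PySem.Set.inter c s).isEmpty

-- one 'for s in rest' round: absorb every circuit meeting the growing c, keep the others; flag = changed
def pvRound (c : List Int) (rest : List (List Int)) : List Int × List (List Int) × Bool :=
  match rest with
  | [] => (c, [], false)
  | s :: rs =>
    if pvInter c s then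
      let r := pvRound (PySem.Set.union c s) rs
      (r.1, r.2.1, true)
    else
      let r := pvRound c rs
      (r.1, s :: r.2.1, r.2.2)

theorem pvRound_keep_le (c : List Int) (rest : List (List Int)) :
    (pvRound c rest).2.1.length ≤ rest.length := by
  induction rest generalizing c with
  | nil => simp [pvRound]
  | cons s rs ih =>
    simp only [pvRound]
    split
    · exact Nat.le_succ_of_le (ih _)
    · simpa using Nat.succ_le_succ (ih _)

theorem pvRound_keep_lt (c : List Int) (rest : List (List Int))
    (h : (pvRound c rest).2.2 = true) : (pvRound c rest).2.1.length < rest.length := by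
  induction rest generalizing c with
  | nil => simp [pvRound] at h
  | cons s rs ih =>
    simp only [pvRound] at h ⊢
    split
    · exact Nat.lt_succ_of_le (pvRound_keep_le _ _)
    · simp only []
      simp only [*] at h
      exact Nat.succ_lt_succ (ih _ h)

-- the 'while changed' loop: saturate the seed c against the remaining circuits
def pvSat (c : List Int) (rest : List (List Int)) : List Int × List (List Int) :=
  let r := pvRound c rest
  if h : r.2.2 = true then pvSat r.1 r.2.1 else (r.1, r.2.1)
termination_by rest.length
decreasing_by
  exact pvRound_keep_lt c rest h

theorem pvSat_rest_le (c : List Int) (rest : List (List Int)) :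
    (pvSat c rest).2.length ≤ rest.length := by
  fun_induction pvSat with
  | case1 c rest r hr ih =>
    exact le_trans ih (le_of_lt (pvRound_keep_lt c rest hr))
  | case2 c rest r hr =>
    exact pvRound_keep_le c rest

-- the outer 'while rest' loop: pop the first circuit, saturate it, emit it
def pvSeeds (circuits : List (List Int)) : List (List Int) :=
  match circuits with
  | [] => []
  | c :: rest =>
    let r := pvSat c rest
    r.1 :: pvSeeds r.2
termination_by circuits.length
decreasing_by
  exact Nat.lt_succ_of_le (pvSat_rest_le c rest)

def merge_circuts_alt (circuits : List (List Int)) : List (List Int) :=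
  PySem.List.sorted ((pvSeeds circuits).map pvCanon) (fun x => -(x.length : Int)) false

-- ===== PRECONDITION & SPEC =====
-- Each inner list encodes a Python set, so it holds distinct elements: a list with duplicates
-- encodes no set (Python's len/== on the set would disagree with the list's).
def Pre_merge_circuts (circuits : List (List Int)) : Prop :=
  ∀ c ∈ circuits, c.Nodup
instance (circuits : List (List Int)) : Decidable (Pre_merge_circuts circuits) := by
  unfold Pre_merge_circuts; infer_instance

def pvWitness_merge_circuts : List (List Int) := [[1, 2], [3], [2, 3], [5]]

def Spec_merge_circuts (circuits : List (List Int)) (out : List (List Int)) : Prop := out = merge_circuts_alt circuits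
instance (circuits : List (List Int)) (out : List (List Int)) : Decidable (Spec_merge_circuts circuits out) := by unfold Spec_merge_circuts; infer_instance

-- ===== CLAIM (what is proved, stated in full; the proofs are below) =====
def Claim_equal_merge_circuts : Prop := ∀ (circuits : List (List Int)), Dom_merge_circuts circuits → Pre_merge_circuts circuits → Spec_merge_circuts circuits (merge_circuts circuits)

-- ===== LEMMAS AND PROOFS =====

-- ===== proof infrastructure =====


def pvOrig (cs : List (List Int)) (i : Nat) : List Int := cs.getD i []

def pvEdge (cs : List (List Int)) (i j : Nat) : Prop :=
  i < cs.length ∧ j < cs.length ∧ ∃ x, x ∈ pvOrig cs i ∧ x ∈ pvOrig cs j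

def pvReach (cs : List (List Int)) : Nat → Nat → Prop := Relation.EqvGen (pvEdge cs)

def pvKey (p : List Nat × List Int) : Nat := p.1.headD 0

def pvWF (cs : List (List Int)) (p : List Nat × List Int) : Prop :=
  p.1 ≠ [] ∧ (∀ j ∈ p.1, pvKey p ≤ j) ∧ (∀ j ∈ p.1, j < cs.length) ∧
  (∀ i ∈ p.1, ∀ j ∈ p.1, pvReach cs i j) ∧
  (∀ x, x ∈ p.2 ↔ ∃ i ∈ p.1, x ∈ pvOrig cs i) ∧ p.2.Nodup

def pvTouchP (s t : List Int) : Prop := ∃ x, x ∈ s ∧ x ∈ t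

def pvGood (cs : List (List Int)) (G : List (List Nat × List Int)) : Prop :=
  (∀ p ∈ G, pvWF cs p) ∧ (G.map pvKey).Pairwise (· < ·)

def pvCovers (cs : List (List Int)) (G : List (List Nat × List Int)) : Prop :=
  ∀ i, i < cs.length → ∃ p ∈ G, ∀ x ∈ pvOrig cs i, x ∈ p.2

def pvMinKeep (cs : List (List Int)) (G : List (List Nat × List Int)) : Prop :=
  ∀ i, i < cs.length → (∀ j, pvReach cs i j → i ≤ j) → ∃ p ∈ G, i ∈ p.1

def pvSatd (G : List (List Nat × List Int)) : Prop :=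
  G.Pairwise (fun p q => ¬ pvTouchP p.2 q.2)

def pvState (cs : List (List Int)) (G : List (List Nat × List Int)) : Prop :=
  pvGood cs G ∧ pvCovers cs G ∧ pvMinKeep cs G

-- basic facts
theorem pvReach_symm {cs : List (List Int)} {i j : Nat} (h : pvReach cs i j) : pvReach cs j i :=
  Relation.EqvGen.symm _ _ h

theorem pvReach_trans {cs : List (List Int)} {i j k : Nat} (h : pvReach cs i j)
    (h' : pvReach cs j k) : pvReach cs i k := Relation.EqvGen.trans _ _ _ h h'

theorem pvReach_refl {cs : List (List Int)} (i : Nat) : pvReach cs i i := Relation.EqvGen.refl i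

theorem pvIsolated {cs : List (List Int)} {i j : Nat} (h : pvReach cs i j) :
    (pvOrig cs i = [] ∨ pvOrig cs j = []) → i = j := by
  induction h with
  | rel a b hab =>
    rintro (h | h) <;> obtain ⟨-, -, x, hx1, hx2⟩ := hab
    · rw [h] at hx1; cases hx1
    · rw [h] at hx2; cases hx2
  | refl a => intro _; rfl
  | symm a b _ ih => intro h; exact (ih h.symm).symm
  | trans a b c _ _ ih1 ih2 =>
    rintro (h | h)
    · have e := ih1 (Or.inl h); subst e; exact ih2 (Or.inl h)
    · have e := ih2 (Or.inr h); subst e; exact ih1 (Or.inr h)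

theorem pvReach_bounds {cs : List (List Int)} {i j : Nat} (h : pvReach cs i j) :
    i = j ∨ (i < cs.length ∧ j < cs.length) := by
  induction h with
  | rel a b hab => exact Or.inr ⟨hab.1, hab.2.1⟩
  | refl a => exact Or.inl rfl
  | symm a b _ ih => rcases ih with h | h; exacts [Or.inl h.symm, Or.inr ⟨h.2, h.1⟩]
  | trans a b c _ _ ih1 ih2 =>
    rcases ih1 with h | h
    · subst h; exact ih2
    · rcases ih2 with h' | h'
      · subst h'; exact Or.inr h
      · exact Or.inr ⟨h.1, h'.2⟩

theorem pvSame {G : List (List Nat × List Int)} (hs : pvSatd G) {p q : List Nat × List Int}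
    (hp : p ∈ G) (hq : q ∈ G) (ht : pvTouchP p.2 q.2) : p = q := by
  induction G with
  | nil => cases hp
  | cons a l ih =>
    rcases List.pairwise_cons.1 hs with ⟨ha, hl⟩
    rcases List.mem_cons.1 hp with hp1 | hp1 <;> rcases List.mem_cons.1 hq with hq1 | hq1
    · rw [hp1, hq1]
    · rw [hp1] at ht ⊢; exact absurd ht (ha q hq1)
    · rw [hq1] at ht ⊢; exact absurd ⟨ht.choose, ht.choose_spec.2, ht.choose_spec.1⟩ (ha p hp1)
    · exact ih hl hp1 hq1

theorem pvKey_mem {cs : List (List Int)} {p : List Nat × List Int} (h : pvWF cs p) :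
    pvKey p ∈ p.1 := by
  obtain ⟨hne, -⟩ := h
  cases hS : p.1 with
  | nil => exact absurd hS hne
  | cons a t => simp [pvKey, hS]

-- bridges from the ports' Bool tests to pvTouchP
theorem pvTouch_iff (c1 c2 : List Int) : pvTouch c1 c2 = true ↔ ∃ x, x ∈ c2 ∧ x ∈ c1 := by
  simp [pvTouch]

theorem pvInter_iff (c s : List Int) : pvInter c s = true ↔ ∃ x, x ∈ c ∧ x ∈ s := by
  constructor
  · intro h
    have hne : PySem.Set.inter c s ≠ [] := by
      intro he; simp [pvInter, he] at h
    obtain ⟨x, hx⟩ := List.exists_mem_of_ne_nil _ hne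
    exact ⟨x, (PySem.Set.mem_inter c s x).1 hx⟩
  · rintro ⟨x, hx1, hx2⟩
    have hx : x ∈ PySem.Set.inter c s := (PySem.Set.mem_inter c s x).2 ⟨hx1, hx2⟩
    have : PySem.Set.inter c s ≠ [] := by rintro he; rw [he] at hx; cases hx
    simp [pvInter, this]

theorem pvEdge_symm {cs : List (List Int)} {a b : Nat} (h : pvEdge cs a b) : pvEdge cs b a := by
  obtain ⟨h1, h2, x, hx1, hx2⟩ := h; exact ⟨h2, h1, x, hx2, hx1⟩

theorem pvEdgeStep {cs : List (List Int)} {G : List (List Nat × List Int)}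
    (hG : pvState cs G) (hs : pvSatd G) {p : List Nat × List Int} (hp : p ∈ G)
    {a b : Nat} (hab : pvEdge cs a b)
    (ha : ∀ x ∈ pvOrig cs a, x ∈ p.2) : ∀ x ∈ pvOrig cs b, x ∈ p.2 := by
  obtain ⟨hna, hnb, x, hx1, hx2⟩ := hab
  obtain ⟨q, hq, hqc⟩ := hG.2.1 b hnb
  have hqp : q = p := pvSame hs hq hp ⟨x, hqc x hx2, ha x hx1⟩
  intro y hy; exact hqp ▸ hqc y hy

-- a saturated covering state absorbs whole reach-classes
theorem pvPropagate {cs : List (List Int)} {G : List (List Nat × List Int)}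
    (hG : pvState cs G) (hs : pvSatd G) {p : List Nat × List Int} (hp : p ∈ G)
    {a b : Nat} (hr : pvReach cs a b) :
    (∀ x ∈ pvOrig cs a, x ∈ p.2) ↔ (∀ x ∈ pvOrig cs b, x ∈ p.2) := by
  induction hr with
  | rel a b hab => exact ⟨pvEdgeStep hG hs hp hab, pvEdgeStep hG hs hp (pvEdge_symm hab)⟩
  | refl a => exact Iff.rfl
  | symm a b _ ih => exact ih.symm
  | trans a b c _ _ ih1 ih2 => exact ih1.trans ih2

-- each nonempty group of a saturated covering state is exactly the union of its key's reach-class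
theorem pvClassUnion {cs : List (List Int)} {G : List (List Nat × List Int)}
    (hG : pvState cs G) (hs : pvSatd G) {p : List Nat × List Int} (hp : p ∈ G) :
    ∀ x : Int, x ∈ p.2 ↔ ∃ j, pvReach cs (pvKey p) j ∧ x ∈ pvOrig cs j := by
  intro x
  obtain ⟨hne, hmin, hbd, hconn, hIU, hnd⟩ := hG.1.1 p hp
  constructor
  · intro hx
    obtain ⟨i, hi, hxi⟩ := (hIU x).1 hx
    exact ⟨i, hconn _ (pvKey_mem (hG.1.1 p hp)) i hi, hxi⟩
  · rintro ⟨j, hrj, hxj⟩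
    have hk : ∀ y ∈ pvOrig cs (pvKey p), y ∈ p.2 := by
      intro y hy; exact (hIU y).2 ⟨pvKey p, pvKey_mem (hG.1.1 p hp), hy⟩
    exact (pvPropagate hG hs hp hrj).1 hk x hxj

-- the key of a nonempty group is the least index of its reach-class
theorem pvKeyMin {cs : List (List Int)} {G : List (List Nat × List Int)}
    (hG : pvState cs G) (hs : pvSatd G) {p : List Nat × List Int} (hp : p ∈ G)
    (hne : p.2 ≠ []) : pvKey p = sInf {j | pvReach cs (pvKey p) j} := by
  obtain ⟨hne', hmin, hbd, hconn, hIU, hnd⟩ := hG.1.1 p hp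
  have hkS : pvKey p ∈ {j | pvReach cs (pvKey p) j} := pvReach_refl _
  have h1 : sInf {j | pvReach cs (pvKey p) j} ≤ pvKey p := Nat.sInf_le hkS
  set m := sInf {j | pvReach cs (pvKey p) j} with hm
  have hrm : pvReach cs (pvKey p) m := Nat.sInf_mem ⟨_, hkS⟩
  rcases eq_or_ne m (pvKey p) with he | hne2
  · omega
  by_cases ho : pvOrig cs m = []
  · exact absurd (pvIsolated (pvReach_symm hrm) (Or.inl ho)) hne2
  -- m is reach-minimal
  have hminm : ∀ j, pvReach cs m j → m ≤ j := by
    intro j hj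
    exact Nat.sInf_le (pvReach_trans hrm hj)
  have hmn : m < cs.length := by
    rcases pvReach_bounds hrm with h | h
    · exact absurd h.symm hne2
    · exact h.2
  obtain ⟨q, hq, hmq⟩ := hG.2.2 m hmn hminm
  obtain ⟨x, hx⟩ := List.exists_mem_of_ne_nil _ ho
  have hxq : x ∈ q.2 := ((hG.1.1 q hq).2.2.2.2.1 x).2 ⟨m, hmq, hx⟩
  have hxp : x ∈ p.2 := (pvClassUnion hG hs hp x).2 ⟨m, hrm, hx⟩
  have : q = p := pvSame hs hq hp ⟨x, hxq, hxp⟩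
  subst this
  have h2 : pvKey q ≤ m := hmin m hmq
  omega

-- empty groups are exactly the empty original circuits, keyed by their own index
theorem pvEmptyChar {cs : List (List Int)} {G : List (List Nat × List Int)}
    (hG : pvState cs G) {p : List Nat × List Int} (hp : p ∈ G) (he : p.2 = []) :
    pvKey p < cs.length ∧ pvOrig cs (pvKey p) = [] := by
  obtain ⟨hne', hmin, hbd, hconn, hIU, hnd⟩ := hG.1.1 p hp
  refine ⟨hbd _ (pvKey_mem (hG.1.1 p hp)), ?_⟩
  rw [List.eq_nil_iff_forall_not_mem]
  intro x hx
  have : x ∈ p.2 := (hIU x).2 ⟨pvKey p, pvKey_mem (hG.1.1 p hp), hx⟩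
  rw [he] at this; cases this

theorem pvEmptyMem {cs : List (List Int)} {G : List (List Nat × List Int)}
    (hG : pvState cs G) {k : Nat} (hk : k < cs.length) (he : pvOrig cs k = []) :
    ∃ p ∈ G, pvKey p = k ∧ p.2 = [] := by
  have hiso : ∀ j, pvReach cs k j → k ≤ j := by
    intro j hj; rw [← pvIsolated hj (Or.inl he)]
  obtain ⟨p, hp, hkp⟩ := hG.2.2 k hk hiso
  obtain ⟨hne', hmin, hbd, hconn, hIU, hnd⟩ := hG.1.1 p hp
  have hall : ∀ i ∈ p.1, i = k := by
    intro i hi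
    exact (pvIsolated (hconn k hkp i hi) (Or.inl he)).symm
  have hkey : pvKey p = k := hall _ (pvKey_mem (hG.1.1 p hp))
  refine ⟨p, hp, hkey, ?_⟩
  rw [List.eq_nil_iff_forall_not_mem]
  intro x hx
  obtain ⟨i, hi, hxi⟩ := (hIU x).1 hx
  rw [hall i hi, he] at hxi; cases hxi

-- nonempty groups have a same-key same-contents partner in any other saturated covering state
theorem pvPartner {cs : List (List Int)} {G H : List (List Nat × List Int)}
    (hG : pvState cs G) (hGs : pvSatd G) (hH : pvState cs H) (hHs : pvSatd H)
    {p : List Nat × List Int} (hp : p ∈ G) (hne : p.2 ≠ []) :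
    ∃ q ∈ H, pvKey q = pvKey p ∧ pvCanon q.2 = pvCanon p.2 := by
  obtain ⟨x0, hx0⟩ := List.exists_mem_of_ne_nil _ hne
  obtain ⟨i0, hi0, hx0i⟩ := ((hG.1.1 p hp).2.2.2.2.1 x0).1 hx0
  have hi0n : i0 < cs.length := (hG.1.1 p hp).2.2.1 i0 hi0
  obtain ⟨q, hq, hqc⟩ := hH.2.1 i0 hi0n
  have hx0q : x0 ∈ q.2 := hqc x0 hx0i
  have hqne : q.2 ≠ [] := by intro h; rw [h] at hx0q; cases hx0q
  -- the two keys are in the same reach-class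
  obtain ⟨j, hj, hx0j⟩ := ((hH.1.1 q hq).2.2.2.2.1 x0).1 hx0q
  have hjn : j < cs.length := (hH.1.1 q hq).2.2.1 j hj
  have hedge : pvEdge cs j i0 := ⟨hjn, hi0n, x0, hx0j, hx0i⟩
  have hreach : pvReach cs (pvKey q) (pvKey p) :=
    pvReach_trans ((hH.1.1 q hq).2.2.2.1 _ (pvKey_mem (hH.1.1 q hq)) j hj)
      (pvReach_trans (Relation.EqvGen.rel _ _ hedge)
        (pvReach_symm ((hG.1.1 p hp).2.2.2.1 _ (pvKey_mem (hG.1.1 p hp)) i0 hi0)))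
  have hsets : {j | pvReach cs (pvKey q) j} = {j | pvReach cs (pvKey p) j} := by
    ext a; constructor
    · intro ha; exact pvReach_trans (pvReach_symm hreach) ha
    · intro ha; exact pvReach_trans hreach ha
  have hkeys : pvKey q = pvKey p := by
    rw [pvKeyMin hH hHs hq hqne, pvKeyMin hG hGs hp hne, hsets]
  -- same contents
  have hmemiff : ∀ x : Int, x ∈ q.2 ↔ x ∈ p.2 := by
    intro x
    rw [pvClassUnion hH hHs hq x, pvClassUnion hG hGs hp x, hkeys]
  have hperm : (pvCanon p.2).Perm q.2 :=
    ((PySem.List.sorted_perm _ _ _).trans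
      ((List.perm_ext_iff_of_nodup (hG.1.1 p hp).2.2.2.2.2 (hH.1.1 q hq).2.2.2.2.2).2
        (fun x => (hmemiff x).symm)))
  have hpw : (pvCanon p.2).Pairwise (fun a b => a ≤ b) := PySem.List.sorted_pairwise _ _
  exact ⟨q, hq, hkeys, PySem.List.sorted_id_eq_of_perm_of_pairwise _ _ hperm hpw⟩

-- two strictly key-sorted association lists with the same members are equal
theorem pvPairsExt : ∀ (l1 l2 : List (Nat × List Int)),
    (l1.map Prod.fst).Pairwise (· < ·) → (l2.map Prod.fst).Pairwise (· < ·) →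
    (∀ kv, kv ∈ l1 ↔ kv ∈ l2) → l1 = l2 := by
  intro l1
  induction l1 with
  | nil =>
    intro l2 _ _ h
    cases l2 with
    | nil => rfl
    | cons b m => exact absurd ((h b).2 (List.mem_cons_self)) (List.not_mem_nil)
  | cons a l ih =>
    intro l2 h1 h2 h
    cases l2 with
    | nil => exact absurd ((h a).1 (List.mem_cons_self)) (List.not_mem_nil)
    | cons b m =>
      rw [List.map_cons] at h1 h2
      have h1c := List.pairwise_cons.1 h1
      have h2c := List.pairwise_cons.1 h2
      have h1h : ∀ kv ∈ l, a.1 < kv.1 := fun kv hkv => h1c.1 _ (List.mem_map_of_mem hkv)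
      have h2h : ∀ kv ∈ m, b.1 < kv.1 := fun kv hkv => h2c.1 _ (List.mem_map_of_mem hkv)
      have hab : a = b := by
        rcases List.mem_cons.1 ((h a).1 List.mem_cons_self) with e | ha
        · exact e
        rcases List.mem_cons.1 ((h b).2 List.mem_cons_self) with e | hb
        · exact e.symm
        have := h2h a ha
        have := h1h b hb
        omega
      subst hab
      have : l = m := by
        refine ih m h1c.2 h2c.2 ?_
        intro kv
        constructor
        · intro hkv
          rcases List.mem_cons.1 ((h kv).1 (List.mem_cons_of_mem _ hkv)) with e | hm
          · subst e; exact absurd (h1h kv hkv) (lt_irrefl _)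
          · exact hm
        · intro hkv
          rcases List.mem_cons.1 ((h kv).2 (List.mem_cons_of_mem _ hkv)) with e | hl
          · subst e; exact absurd (h2h kv hkv) (lt_irrefl _)
          · exact hl
      rw [this]

-- any two saturated covering states have the same canonical picture
theorem pvUnique {cs : List (List Int)} {G H : List (List Nat × List Int)}
    (hG : pvState cs G) (hGs : pvSatd G) (hH : pvState cs H) (hHs : pvSatd H) :
    G.map (fun p => pvCanon p.2) = H.map (fun p => pvCanon p.2) := by
  have hmem : ∀ {G H : List (List Nat × List Int)},
      pvState cs G → pvSatd G → pvState cs H → pvSatd H →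
      ∀ kv, kv ∈ G.map (fun p => (pvKey p, pvCanon p.2)) →
        kv ∈ H.map (fun p => (pvKey p, pvCanon p.2)) := by
    intro G H hG hGs hH hHs kv hkv
    obtain ⟨p, hp, rfl⟩ := List.mem_map.1 hkv
    by_cases hne : p.2 = []
    · obtain ⟨hk, ho⟩ := pvEmptyChar hG hp hne
      obtain ⟨q, hq, hkq, hq2⟩ := pvEmptyMem hH hk ho
      refine List.mem_map.2 ⟨q, hq, ?_⟩
      rw [hkq, hq2, hne]
    · obtain ⟨q, hq, hkq, hcq⟩ := pvPartner hG hGs hH hHs hp hne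
      exact List.mem_map.2 ⟨q, hq, by rw [hkq, hcq]⟩
  have hpairs : G.map (fun p => (pvKey p, pvCanon p.2)) = H.map (fun p => (pvKey p, pvCanon p.2)) := by
    refine pvPairsExt _ _ ?_ ?_ ?_
    · rw [List.map_map]
      exact hG.1.2
    · rw [List.map_map]
      exact hH.1.2
    · intro kv
      exact ⟨hmem hG hGs hH hHs kv, hmem hH hHs hG hGs kv⟩
  have := congrArg (List.map Prod.snd) hpairs
  rw [List.map_map, List.map_map] at this
  exact this

-- merging a touching entry into a builder preserves well-formedness and the key
theorem pvKey_append {b : List Nat × List Int} (hb : b.1 ≠ []) (S : List Nat) :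
    (b.1 ++ S).headD 0 = pvKey b := by
  cases h : b.1 with
  | nil => exact absurd h hb
  | cons a t => simp [pvKey, h]

theorem pvMergeWF {cs : List (List Int)} {b p : List Nat × List Int}
    (hb : pvWF cs b) (hp : pvWF cs p) (hkey : pvKey b < pvKey p)
    (ht : pvTouchP b.2 p.2) :
    pvWF cs (b.1 ++ p.1, PySem.Set.union b.2 p.2) ∧
      pvKey (b.1 ++ p.1, PySem.Set.union b.2 p.2) = pvKey b := by
  obtain ⟨hb1, hb2, hb3, hb4, hb5, hb6⟩ := hb
  obtain ⟨hp1, hp2, hp3, hp4, hp5, hp6⟩ := hp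
  have hkeq : pvKey (b.1 ++ p.1, PySem.Set.union b.2 p.2) = pvKey b := pvKey_append hb1 p.1
  obtain ⟨x, hxb, hxp⟩ := ht
  obtain ⟨a, ha, hxa⟩ := (hb5 x).1 hxb
  obtain ⟨c, hc, hxc⟩ := (hp5 x).1 hxp
  have hedge : pvReach cs a c :=
    Relation.EqvGen.rel _ _ ⟨hb3 a ha, hp3 c hc, x, hxa, hxc⟩
  have hcross : ∀ i ∈ b.1, ∀ j ∈ p.1, pvReach cs i j := by
    intro i hi j hj
    exact pvReach_trans (hb4 i hi a ha) (pvReach_trans hedge (hp4 c hc j hj))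
  refine ⟨⟨by simp [hb1], ?_, ?_, ?_, ?_, PySem.Set.nodup_union _ _ hb6⟩, hkeq⟩
  · intro j hj
    rw [hkeq]
    rcases List.mem_append.1 hj with h | h
    · exact hb2 j h
    · exact le_trans (le_of_lt hkey) (hp2 j h)
  · intro j hj
    rcases List.mem_append.1 hj with h | h
    · exact hb3 j h
    · exact hp3 j h
  · intro i hi j hj
    rcases List.mem_append.1 hi with h | h <;> rcases List.mem_append.1 hj with h' | h'
    · exact hb4 i h j h'
    · exact hcross i h j h'
    · exact pvReach_symm (hcross j h' i h)
    · exact hp4 i h j h'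
  · intro y
    rw [PySem.Set.mem_union]
    constructor
    · rintro (h | h)
      · obtain ⟨i, hi, hyi⟩ := (hb5 y).1 h
        exact ⟨i, List.mem_append_left _ hi, hyi⟩
      · obtain ⟨i, hi, hyi⟩ := (hp5 y).1 h
        exact ⟨i, List.mem_append_right _ hi, hyi⟩
    · rintro ⟨i, hi, hyi⟩
      rcases List.mem_append.1 hi with h | h
      · exact Or.inl ((hb5 y).2 ⟨i, h, hyi⟩)
      · exact Or.inr ((hp5 y).2 ⟨i, h, hyi⟩)

-- one saturation round, on ghost states
theorem pvRound_spec {cs : List (List Int)} : ∀ (R : List (List Nat × List Int))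
    (b : List Nat × List Int), pvWF cs b → (∀ p ∈ R, pvWF cs p) →
    (∀ p ∈ R, pvKey b < pvKey p) →
    ∃ (b' : List Nat × List Int) (K : List (List Nat × List Int)),
      (pvRound b.2 (R.map Prod.snd)).1 = b'.2 ∧
      (pvRound b.2 (R.map Prod.snd)).2.1 = K.map Prod.snd ∧
      pvWF cs b' ∧ pvKey b' = pvKey b ∧
      (∀ x ∈ b.2, x ∈ b'.2) ∧ (∀ i ∈ b.1, i ∈ b'.1) ∧
      K.Sublist R ∧
      (∀ x ∈ b'.2, x ∈ b.2 ∨ ∃ p ∈ R, x ∈ p.2) ∧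
      (∀ p ∈ R, ∀ i ∈ p.1, i ∈ b'.1 ∨ ∃ k ∈ K, i ∈ k.1) ∧
      (∀ p ∈ R, ∀ x ∈ p.2, x ∈ b'.2 ∨ ∃ k ∈ K, x ∈ k.2) ∧
      ((pvRound b.2 (R.map Prod.snd)).2.2 = false →
        b' = b ∧ K = R ∧ ∀ p ∈ R, ¬ pvTouchP b'.2 p.2) := by
  intro R
  induction R with
  | nil =>
    intro b hb _ _
    exact ⟨b, [], rfl, rfl, hb, rfl, fun x h => h, fun i h => h, List.Sublist.refl _,
      fun x h => Or.inl h, by simp, by simp, fun _ => ⟨rfl, rfl, by simp⟩⟩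
  | cons p R' ih =>
    intro b hb hR hK
    by_cases hint : pvInter b.2 p.2 = true
    · -- absorb p into the builder
      have ht : pvTouchP b.2 p.2 := by
        obtain ⟨x, h1, h2⟩ := (pvInter_iff _ _).1 hint; exact ⟨x, h1, h2⟩
      obtain ⟨hwf, hkeq⟩ := pvMergeWF hb (hR p List.mem_cons_self)
        (hK p List.mem_cons_self) ht
      obtain ⟨b', K, e1, e2, h3, h4, h5, h6, h7, h8, h9, h10, h11⟩ :=
        ih (b.1 ++ p.1, PySem.Set.union b.2 p.2) hwf
          (fun q hq => hR q (List.mem_cons_of_mem _ hq))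
          (fun q hq => by rw [hkeq]; exact hK q (List.mem_cons_of_mem _ hq))
      have hrr : pvRound b.2 ((p :: R').map Prod.snd)
          = ((pvRound (PySem.Set.union b.2 p.2) (R'.map Prod.snd)).1,
             (pvRound (PySem.Set.union b.2 p.2) (R'.map Prod.snd)).2.1, true) := by
        simp [pvRound, hint]
      refine ⟨b', K, by rw [hrr]; exact e1, by rw [hrr]; exact e2, h3, by rw [h4, hkeq], ?_, ?_,
        List.Sublist.cons _ h7, ?_, ?_, ?_, by rw [hrr]; intro h; cases h⟩
      · intro x hx
        exact h5 x (by rw [PySem.Set.mem_union]; exact Or.inl hx)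
      · intro i hi
        exact h6 i (List.mem_append_left _ hi)
      · intro x hx
        rcases h8 x hx with h | ⟨q, hq, hxq⟩
        · rcases (PySem.Set.mem_union _ _ _).1 h with h | h
          · exact Or.inl h
          · exact Or.inr ⟨p, List.mem_cons_self, h⟩
        · exact Or.inr ⟨q, List.mem_cons_of_mem _ hq, hxq⟩
      · intro q hq i hi
        rcases List.mem_cons.1 hq with rfl | hq'
        · exact Or.inl (h6 i (List.mem_append_right _ hi))
        · exact h9 q hq' i hi
      · intro q hq x hx
        rcases List.mem_cons.1 hq with rfl | hq'
        · exact Or.inl (h5 x (by rw [PySem.Set.mem_union]; exact Or.inr hx))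
        · exact h10 q hq' x hx
    · -- keep p
      obtain ⟨b', K, e1, e2, h3, h4, h5, h6, h7, h8, h9, h10, h11⟩ :=
        ih b hb (fun q hq => hR q (List.mem_cons_of_mem _ hq))
          (fun q hq => hK q (List.mem_cons_of_mem _ hq))
      have hrr : pvRound b.2 ((p :: R').map Prod.snd)
          = ((pvRound b.2 (R'.map Prod.snd)).1,
             p.2 :: (pvRound b.2 (R'.map Prod.snd)).2.1,
             (pvRound b.2 (R'.map Prod.snd)).2.2) := by
        simp [pvRound, hint]
      refine ⟨b', p :: K, by rw [hrr]; exact e1, by rw [hrr]; simp [e2], h3, h4, h5, h6,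
        List.Sublist.cons₂ _ h7, ?_, ?_, ?_, ?_⟩
      · intro x hx
        rcases h8 x hx with h | ⟨q, hq, hxq⟩
        · exact Or.inl h
        · exact Or.inr ⟨q, List.mem_cons_of_mem _ hq, hxq⟩
      · intro q hq i hi
        rcases List.mem_cons.1 hq with rfl | hq'
        · exact Or.inr ⟨q, List.mem_cons_self, hi⟩
        · rcases h9 q hq' i hi with h | ⟨k, hk, hik⟩
          · exact Or.inl h
          · exact Or.inr ⟨k, List.mem_cons_of_mem _ hk, hik⟩
      · intro q hq x hx
        rcases List.mem_cons.1 hq with rfl | hq'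
        · exact Or.inr ⟨q, List.mem_cons_self, hx⟩
        · rcases h10 q hq' x hx with h | ⟨k, hk, hxk⟩
          · exact Or.inl h
          · exact Or.inr ⟨k, List.mem_cons_of_mem _ hk, hxk⟩
      · rw [hrr]
        intro hf
        obtain ⟨hb', hK', hnt⟩ := h11 hf
        refine ⟨hb', by rw [hK'], ?_⟩
        intro q hq
        rcases List.mem_cons.1 hq with rfl | hq'
        · rw [hb']
          intro htc
          obtain ⟨x, hx1, hx2⟩ := htc
          exact hint ((pvInter_iff _ _).2 ⟨x, hx1, hx2⟩)
        · exact hnt q hq'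

-- full saturation of one seed, on ghost states
theorem pvSat_spec {cs : List (List Int)} : ∀ (n : Nat) (R : List (List Nat × List Int))
    (b : List Nat × List Int), R.length ≤ n → pvWF cs b → (∀ p ∈ R, pvWF cs p) →
    (∀ p ∈ R, pvKey b < pvKey p) →
    ∃ (b' : List Nat × List Int) (K : List (List Nat × List Int)),
      pvSat b.2 (R.map Prod.snd) = (b'.2, K.map Prod.snd) ∧
      pvWF cs b' ∧ pvKey b' = pvKey b ∧
      (∀ x ∈ b.2, x ∈ b'.2) ∧ (∀ i ∈ b.1, i ∈ b'.1) ∧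
      K.Sublist R ∧
      (∀ x ∈ b'.2, x ∈ b.2 ∨ ∃ p ∈ R, x ∈ p.2) ∧
      (∀ p ∈ R, ∀ i ∈ p.1, i ∈ b'.1 ∨ ∃ k ∈ K, i ∈ k.1) ∧
      (∀ p ∈ R, ∀ x ∈ p.2, x ∈ b'.2 ∨ ∃ k ∈ K, x ∈ k.2) ∧
      (∀ k ∈ K, ¬ pvTouchP b'.2 k.2) := by
  intro n
  induction n with
  | zero =>
    intro R b hlen hb hR hK
    have : R = [] := List.eq_nil_of_length_eq_zero (Nat.le_zero.1 hlen)
    subst this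
    refine ⟨b, [], ?_, hb, rfl, fun x h => h, fun i h => h, List.Sublist.refl _,
      fun x h => Or.inl h, by simp, by simp, by simp⟩
    simp only [List.map_nil]
    rw [pvSat]
    simp [pvRound]
  | succ n ih =>
    intro R b hlen hb hR hK
    obtain ⟨b1, K1, e1, e2, h3, h4, h5, h6, h7, h8, h9, h10, h11⟩ :=
      pvRound_spec R b hb hR hK
    by_cases hf : (pvRound b.2 (R.map Prod.snd)).2.2 = true
    · -- something was absorbed: saturate again on the keeps
      have hlt : K1.length < R.length := by
        have := pvRound_keep_lt b.2 (R.map Prod.snd) hf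
        rw [e2] at this
        simpa using this
      obtain ⟨b', K, e1', h3', h4', h5', h6', h7', h8', h9', h10', h11'⟩ :=
        ih K1 b1 (by omega) h3
          (fun q hq => hR q (h7.mem hq))
          (fun q hq => by rw [h4]; exact hK q (h7.mem hq))
      have hsat : pvSat b.2 (R.map Prod.snd) = pvSat b1.2 (K1.map Prod.snd) := by
        rw [pvSat]
        simp only [hf, ← e1, ← e2]
        simp
      refine ⟨b', K, by rw [hsat]; exact e1', h3', by rw [h4', h4],
        fun x hx => h5' x (h5 x hx), fun i hi => h6' i (h6 i hi),
        h7'.trans h7, ?_, ?_, ?_, h11'⟩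
      · intro x hx
        rcases h8' x hx with h | ⟨q, hq, hxq⟩
        · rcases h8 x h with h' | ⟨q, hq, hxq⟩
          · exact Or.inl h'
          · exact Or.inr ⟨q, hq, hxq⟩
        · exact Or.inr ⟨q, h7.mem hq, hxq⟩
      · intro q hq i hi
        rcases h9 q hq i hi with h | ⟨k, hk, hik⟩
        · exact Or.inl (h6' i h)
        · exact h9' k hk i hik
      · intro q hq x hx
        rcases h10 q hq x hx with h | ⟨k, hk, hxk⟩
        · exact Or.inl (h5' x h)
        · exact h10' k hk x hxk
    · -- nothing absorbed: the loop stops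
      have hf' : (pvRound b.2 (R.map Prod.snd)).2.2 = false := by
        cases h : (pvRound b.2 (R.map Prod.snd)).2.2
        · rfl
        · exact absurd h hf
      obtain ⟨hb1, hK1, hnt⟩ := h11 hf'
      have hsat : pvSat b.2 (R.map Prod.snd) = (b1.2, K1.map Prod.snd) := by
        rw [pvSat, dif_neg (by simp [hf'] : ¬ ((pvRound b.2 (R.map Prod.snd)).2.2 = true)), e1, e2]
      refine ⟨b1, K1, hsat, h3, h4, h5, h6, h7, h8, ?_, ?_, ?_⟩
      · intro q hq i hi
        exact Or.inr ⟨q, by rw [hK1]; exact hq, hi⟩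
      · intro q hq x hx
        exact Or.inr ⟨q, by rw [hK1]; exact hq, hx⟩
      · intro k hk
        exact hnt k (h7.mem hk)

-- the whole saturation sweep, on ghost states
theorem pvSeeds_spec {cs : List (List Int)} : ∀ (n : Nat) (R : List (List Nat × List Int)),
    R.length ≤ n → (∀ p ∈ R, pvWF cs p) → ((R.map pvKey).Pairwise (· < ·)) →
    ∃ G : List (List Nat × List Int),
      pvSeeds (R.map Prod.snd) = G.map Prod.snd ∧
      (∀ p ∈ G, pvWF cs p) ∧
      (G.map pvKey).Sublist (R.map pvKey) ∧
      (∀ q ∈ R, ∀ i ∈ q.1, ∃ g ∈ G, i ∈ g.1) ∧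
      (∀ q ∈ R, ∀ x ∈ q.2, ∃ g ∈ G, x ∈ g.2) ∧
      (∀ g ∈ G, ∀ x ∈ g.2, ∃ q ∈ R, x ∈ q.2) ∧
      pvSatd G := by
  intro n
  induction n with
  | zero =>
    intro R hlen _ _
    have : R = [] := List.eq_nil_of_length_eq_zero (Nat.le_zero.1 hlen)
    subst this
    exact ⟨[], by simp [pvSeeds], by simp, by simp, by simp, by simp, by simp,
      List.Pairwise.nil⟩
  | succ n ih =>
    intro R hlen hR hpw
    cases R with
    | nil =>
      exact ⟨[], by simp [pvSeeds], by simp, by simp, by simp, by simp, by simp,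
        List.Pairwise.nil⟩
    | cons q R' =>
      rw [List.map_cons] at hpw
      have hpwc := List.pairwise_cons.1 hpw
      obtain ⟨b', K, e1, h3, h4, h5, h6, h7, h8, h9, h10, h11⟩ :=
        pvSat_spec R'.length R' q (le_refl _) (hR q List.mem_cons_self)
          (fun p hp => hR p (List.mem_cons_of_mem _ hp))
          (fun p hp => hpwc.1 _ (List.mem_map_of_mem hp))
      have hKlen : K.length ≤ R'.length := h7.length_le
      obtain ⟨G', e2, g3, g4, g5, g6, g7, g8⟩ :=
        ih K (by simp at hlen; omega) (fun p hp => hR p (List.mem_cons_of_mem _ (h7.mem hp)))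
          (hpwc.2.sublist (h7.map pvKey))
      have hseeds : pvSeeds ((q :: R').map Prod.snd) = b'.2 :: G'.map Prod.snd := by
        rw [List.map_cons, pvSeeds]
        simp only [e1]
        exact congrArg _ e2
      refine ⟨b' :: G', by rw [hseeds, List.map_cons], ?_, ?_, ?_, ?_, ?_, ?_⟩
      · intro p hp
        rcases List.mem_cons.1 hp with rfl | hp'
        · exact h3
        · exact g3 p hp'
      · rw [List.map_cons, List.map_cons, h4]
        exact List.Sublist.cons₂ _ (g4.trans (h7.map pvKey))
      · intro p hp i hi
        rcases List.mem_cons.1 hp with rfl | hp'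
        · exact ⟨b', List.mem_cons_self, h6 i hi⟩
        · rcases h9 p hp' i hi with h | ⟨k, hk, hik⟩
          · exact ⟨b', List.mem_cons_self, h⟩
          · obtain ⟨g, hg, hig⟩ := g5 k hk i hik
            exact ⟨g, List.mem_cons_of_mem _ hg, hig⟩
      · intro p hp x hx
        rcases List.mem_cons.1 hp with rfl | hp'
        · exact ⟨b', List.mem_cons_self, h5 x hx⟩
        · rcases h10 p hp' x hx with h | ⟨k, hk, hxk⟩
          · exact ⟨b', List.mem_cons_self, h⟩
          · obtain ⟨g, hg, hxg⟩ := g6 k hk x hxk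
            exact ⟨g, List.mem_cons_of_mem _ hg, hxg⟩
      · intro g hg x hx
        rcases List.mem_cons.1 hg with rfl | hg'
        · rcases h8 x hx with h | ⟨p, hp, hxp⟩
          · exact ⟨q, List.mem_cons_self, h⟩
          · exact ⟨p, List.mem_cons_of_mem _ hp, hxp⟩
        · obtain ⟨k, hk, hxk⟩ := g7 g hg' x hx
          exact ⟨k, List.mem_cons_of_mem _ (h7.mem hk), hxk⟩
      · refine List.pairwise_cons.2 ⟨?_, g8⟩
        intro g hg ht
        obtain ⟨x, hx1, hx2⟩ := ht
        obtain ⟨k, hk, hxk⟩ := g7 g hg x hx2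
        exact h11 k hk ⟨x, hx1, hxk⟩

-- ----- A-side: the inner absorb loop, on ghost states -----
theorem pvAbsorb_spec {cs : List (List Int)} : ∀ (R : List (List Nat × List Int))
    (b : List Nat × List Int) (seen : List (List Int)),
    pvWF cs b → (∀ p ∈ R, pvWF cs p) → (∀ p ∈ R, pvKey b < pvKey p) →
    ∃ (b' : List Nat × List Int) (A : List (List Nat × List Int)),
      pvAbsorb b.2 (R.map Prod.snd) seen = (b'.2, seen ++ A.map Prod.snd) ∧
      pvWF cs b' ∧ pvKey b' = pvKey b ∧
      (∀ x ∈ b.2, x ∈ b'.2) ∧ (∀ i ∈ b.1, i ∈ b'.1) ∧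
      (∀ p ∈ A, p ∈ R) ∧
      (∀ p ∈ A, ∀ i ∈ p.1, i ∈ b'.1) ∧ (∀ p ∈ A, ∀ x ∈ p.2, x ∈ b'.2) ∧
      (∀ p ∈ A, p.2 ≠ []) ∧
      (∀ x ∈ b'.2, x ∈ b.2 ∨ ∃ p ∈ R, x ∈ p.2) := by
  intro R
  induction R with
  | nil =>
    intro b seen hb _ _
    exact ⟨b, [], by simp [pvAbsorb], hb, rfl, fun x h => h, fun i h => h,
      by simp, by simp, by simp, by simp, fun x h => Or.inl h⟩
  | cons p R' ih =>
    intro b seen hb hR hK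
    by_cases ht : pvTouch b.2 p.2 = true
    · have htc : pvTouchP b.2 p.2 := by
        obtain ⟨x, h1, h2⟩ := (pvTouch_iff _ _).1 ht; exact ⟨x, h2, h1⟩
      have hpne : p.2 ≠ [] := by
        obtain ⟨x, -, hx⟩ := htc; intro h; rw [h] at hx; cases hx
      obtain ⟨hwf, hkeq⟩ := pvMergeWF hb (hR p List.mem_cons_self)
        (hK p List.mem_cons_self) htc
      obtain ⟨b', A, e1, h3, h4, h5, h6, h7, h8, h9, h10, h11⟩ :=
        ih (b.1 ++ p.1, PySem.Set.union b.2 p.2) (seen ++ [p.2]) hwf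
          (fun q hq => hR q (List.mem_cons_of_mem _ hq))
          (fun q hq => by rw [hkeq]; exact hK q (List.mem_cons_of_mem _ hq))
      have heq : pvAbsorb b.2 ((p :: R').map Prod.snd) seen
          = (b'.2, seen ++ (p :: A).map Prod.snd) := by
        rw [List.map_cons, pvAbsorb, if_pos ht, e1]
        simp
      refine ⟨b', p :: A, heq, h3, by rw [h4, hkeq], ?_, ?_, ?_, ?_, ?_, ?_, ?_⟩
      · intro x hx; exact h5 x (by rw [PySem.Set.mem_union]; exact Or.inl hx)
      · intro i hi; exact h6 i (List.mem_append_left _ hi)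
      · intro q hq
        rcases List.mem_cons.1 hq with rfl | hq'
        · exact List.mem_cons_self
        · exact List.mem_cons_of_mem _ (h7 q hq')
      · intro q hq i hi
        rcases List.mem_cons.1 hq with rfl | hq'
        · exact h6 i (List.mem_append_right _ hi)
        · exact h8 q hq' i hi
      · intro q hq x hx
        rcases List.mem_cons.1 hq with rfl | hq'
        · exact h5 x (by rw [PySem.Set.mem_union]; exact Or.inr hx)
        · exact h9 q hq' x hx
      · intro q hq
        rcases List.mem_cons.1 hq with rfl | hq'
        · exact hpne
        · exact h10 q hq'
      · intro x hx
        rcases h11 x hx with h | ⟨q, hq, hxq⟩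
        · rcases (PySem.Set.mem_union _ _ _).1 h with h' | h'
          · exact Or.inl h'
          · exact Or.inr ⟨p, List.mem_cons_self, h'⟩
        · exact Or.inr ⟨q, List.mem_cons_of_mem _ hq, hxq⟩
    · obtain ⟨b', A, e1, h3, h4, h5, h6, h7, h8, h9, h10, h11⟩ :=
        ih b seen hb (fun q hq => hR q (List.mem_cons_of_mem _ hq))
          (fun q hq => hK q (List.mem_cons_of_mem _ hq))
      have heq : pvAbsorb b.2 ((p :: R').map Prod.snd) seen
          = (b'.2, seen ++ A.map Prod.snd) := by
        rw [List.map_cons, pvAbsorb, if_neg ht]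
        exact e1
      refine ⟨b', A, heq, h3, h4, h5, h6,
        fun q hq => List.mem_cons_of_mem _ (h7 q hq), h8, h9, h10, ?_⟩
      intro x hx
      rcases h11 x hx with h | ⟨q, hq, hxq⟩
      · exact Or.inl h
      · exact Or.inr ⟨q, List.mem_cons_of_mem _ hq, hxq⟩

-- Python set equality of the underlying lists
theorem pvSetEq_iff (s t : List Int) : PySem.Set.equal s t = true ↔ ∀ x, x ∈ s ↔ x ∈ t := by
  simp [pysem]

-- ----- A-side: one pass, on ghost states -----
theorem pvPass_spec {cs : List (List Int)} : ∀ (R : List (List Nat × List Int))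
    (seen : List (List Int)) (P : List (List Nat × List Int)),
    (∀ p ∈ P ++ R, pvWF cs p) →
    (((P ++ R).map pvKey).Pairwise (· < ·)) →
    (∀ t ∈ seen, t ≠ [] ∧ ∃ p ∈ P, ∀ x ∈ t, x ∈ p.2) →
    ∃ G : List (List Nat × List Int),
      pvPass (R.map Prod.snd) seen = G.map Prod.snd ∧
      (∀ p ∈ P ++ G, pvWF cs p) ∧ (((P ++ G).map pvKey).Pairwise (· < ·)) ∧
      (∀ q ∈ R, ∃ p ∈ P ++ G, ∀ x ∈ q.2, x ∈ p.2) ∧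
      (∀ q ∈ R, ∀ m ∈ q.1, (∀ j, pvReach cs m j → m ≤ j) → ∃ p ∈ P ++ G, m ∈ p.1) := by
  intro R
  induction R with
  | nil =>
    intro seen P hWF hpw _
    exact ⟨[], by simp [pvPass], by simpa using hWF, by simpa using hpw, by simp, by simp⟩
  | cons q R' ih =>
    intro seen P hWF hpw hseen
    have hqWF : pvWF cs q := hWF q (by simp)
    have hkeylt : ∀ p ∈ P, pvKey p < pvKey q := by
      intro p hp
      have := (List.pairwise_append.1 (by simpa using hpw)).2.2
      exact this _ (List.mem_map_of_mem hp) _ (by simp)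
    by_cases hskip : (seen.any fun t => PySem.Set.equal t q.2) = true
    · -- the current circuit was already absorbed (as a set) into an earlier builder
      obtain ⟨t, hts, hteq⟩ := List.any_eq_true.1 hskip
      obtain ⟨htne, p0, hp0, hp0c⟩ := hseen t hts
      have htq : ∀ x, x ∈ t ↔ x ∈ q.2 := (pvSetEq_iff _ _).1 hteq
      have hqcov : ∀ x ∈ q.2, x ∈ p0.2 := fun x hx => hp0c x ((htq x).2 hx)
      -- its indices can contain no reach-minimal index
      have hqmin : ∀ m ∈ q.1, (∀ j, pvReach cs m j → m ≤ j) → False := by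
        intro m hm hmin
        obtain ⟨x, hxt⟩ := List.exists_mem_of_ne_nil _ htne
        have hxq : x ∈ q.2 := (htq x).1 hxt
        have hxp0 : x ∈ p0.2 := hp0c x hxt
        obtain ⟨a, ha, hxa⟩ := ((hWF p0 (List.mem_append_left _ hp0)).2.2.2.2.1 x).1 hxp0
        obtain ⟨bq, hbq, hxbq⟩ := (hqWF.2.2.2.2.1 x).1 hxq
        have hedge : pvReach cs bq a :=
          Relation.EqvGen.rel _ _ ⟨hqWF.2.2.1 bq hbq, (hWF p0 (List.mem_append_left _ hp0)).2.2.1 a ha, x, hxbq, hxa⟩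
        have hreach : pvReach cs m (pvKey p0) :=
          pvReach_trans (hqWF.2.2.2.1 m hm bq hbq)
            (pvReach_trans hedge
              ((hWF p0 (List.mem_append_left _ hp0)).2.2.2.1 a ha _
                (pvKey_mem (hWF p0 (List.mem_append_left _ hp0)))))
        have h1 : m ≤ pvKey p0 := hmin _ hreach
        have h2 : pvKey p0 < pvKey q := hkeylt p0 hp0
        have h3 : pvKey q ≤ m := hqWF.2.1 m hm
        omega
      obtain ⟨G, e1, g2, g3, g4, g5⟩ :=
        ih seen P
          (by
            intro p hp
            rcases List.mem_append.1 hp with h | h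
            · exact hWF p (List.mem_append_left _ h)
            · exact hWF p (List.mem_append_right _ (List.mem_cons_of_mem _ h)))
          (by
            refine List.Pairwise.sublist ?_ hpw
            rw [List.map_append, List.map_append, List.map_cons]
            exact (List.Sublist.refl _).append (List.sublist_cons_self _ _))
          hseen
      have heq : pvPass ((q :: R').map Prod.snd) seen = G.map Prod.snd := by
        rw [List.map_cons, pvPass, if_pos hskip]
        exact e1
      refine ⟨G, heq, g2, g3, ?_, ?_⟩
      · intro q' hq'
        rcases List.mem_cons.1 hq' with rfl | h
        · exact ⟨p0, List.mem_append_left _ hp0, hqcov⟩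
        · exact g4 q' h
      · intro q' hq' m hm hmin
        rcases List.mem_cons.1 hq' with rfl | h
        · exact absurd (hqmin m hm hmin) (fun h => h)
        · exact g5 q' h m hm hmin
    · -- build a new group seeded at q
      obtain ⟨b', A, e1, h3, h4, h5, h6, h7, h8, h9, h10, h11⟩ :=
        pvAbsorb_spec R' q seen hqWF
          (fun p hp => hWF p (List.mem_append_right _ (List.mem_cons_of_mem _ hp)))
          (fun p hp => by
            have hpwR : ((q :: R').map pvKey).Pairwise (· < ·) :=
              hpw.sublist (by rw [List.map_append]; exact List.sublist_append_right _ _)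
            rw [List.map_cons] at hpwR
            exact (List.pairwise_cons.1 hpwR).1 _ (List.mem_map_of_mem hp))
      have hkeymap : ((P ++ [b'] ++ R').map pvKey) = ((P ++ q :: R').map pvKey) := by
        simp [h4]
      obtain ⟨G', e2, g2, g3, g4, g5⟩ :=
        ih (seen ++ A.map Prod.snd) (P ++ [b'])
          (by
            intro p hp
            rcases List.mem_append.1 hp with h | h
            · rcases List.mem_append.1 h with h' | h'
              · exact hWF p (List.mem_append_left _ h')
              · rw [List.mem_singleton.1 h']; exact h3
            · exact hWF p (List.mem_append_right _ (List.mem_cons_of_mem _ h)))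
          (by rw [List.append_assoc]
              rw [show P ++ ([b'] ++ R') = P ++ [b'] ++ R' from (List.append_assoc _ _ _).symm,
                hkeymap]
              exact hpw)
          (by
            intro t hts
            rcases List.mem_append.1 hts with h | h
            · obtain ⟨htne, p, hp, hpc⟩ := hseen t h
              exact ⟨htne, p, List.mem_append_left _ hp, hpc⟩
            · obtain ⟨p, hp, rfl⟩ := List.mem_map.1 h
              exact ⟨h10 p hp, b', List.mem_append_right _ (List.mem_singleton.2 rfl),
                fun x hx => h9 p hp x hx⟩)
      have heq : pvPass ((q :: R').map Prod.snd) seen = (b' :: G').map Prod.snd := by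
        rw [List.map_cons, pvPass, if_neg hskip]
        show (pvAbsorb q.2 (R'.map Prod.snd) seen).1 ::
            pvPass (R'.map Prod.snd) (pvAbsorb q.2 (R'.map Prod.snd) seen).2
          = (b' :: G').map Prod.snd
        rw [e1, List.map_cons, e2]
      have hFlat : P ++ [b'] ++ G' = P ++ b' :: G' := by simp
      refine ⟨b' :: G', heq, by rw [← hFlat]; exact g2, by rw [← hFlat]; exact g3, ?_, ?_⟩
      · intro q' hq'
        rcases List.mem_cons.1 hq' with rfl | h
        · exact ⟨b', List.mem_append_right _ List.mem_cons_self, h5⟩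
        · obtain ⟨p, hp, hpc⟩ := g4 q' h
          exact ⟨p, by rw [← hFlat]; exact hp, hpc⟩
      · intro q' hq' m hm hmin
        rcases List.mem_cons.1 hq' with rfl | h
        · exact ⟨b', List.mem_append_right _ List.mem_cons_self, h6 m hm⟩
        · obtain ⟨p, hp, hpm⟩ := g5 q' h m hm hmin
          exact ⟨p, by rw [← hFlat]; exact hp, hpm⟩

-- ----- A-side: the fixpoint test -----
theorem pvAbsorb_seen_mono : ∀ (l : List (List Int)) (c : List Int) (seen : List (List Int)) (t : List Int),
    t ∈ seen → t ∈ (pvAbsorb c l seen).2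
  | [], c, seen, t, h => h
  | c2 :: rs, c, seen, t, h => by
    rw [pvAbsorb]
    split
    · exact pvAbsorb_seen_mono rs _ _ t (List.mem_append_left _ h)
    · exact pvAbsorb_seen_mono rs _ _ t h

theorem pvAbsorb_cases : ∀ (l : List (List Int)) (c : List Int) (seen : List (List Int)),
    (∀ c2 ∈ l, pvTouch c c2 = false) ∨ ∃ c2 ∈ l, c2 ∈ (pvAbsorb c l seen).2
  | [], c, seen => Or.inl (by simp)
  | c2 :: rs, c, seen => by
    rw [pvAbsorb]
    by_cases ht : pvTouch c c2 = true
    · rw [if_pos ht]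
      exact Or.inr ⟨c2, List.mem_cons_self,
        pvAbsorb_seen_mono rs _ _ c2 (List.mem_append_right _ (List.mem_singleton.2 rfl))⟩
    · rw [if_neg ht]
      rcases pvAbsorb_cases rs c seen with h | ⟨c3, hc3, hm⟩
      · refine Or.inl ?_
        intro c4 hc4
        rcases List.mem_cons.1 hc4 with rfl | h'
        · cases hb : pvTouch c c4
          · rfl
          · exact absurd hb ht
        · exact h c4 h'
      · exact Or.inr ⟨c3, List.mem_cons_of_mem _ hc3, hm⟩

theorem pvAbsorb_all_false : ∀ (l : List (List Int)) (c : List Int) (seen : List (List Int)),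
    (∀ c2 ∈ l, pvTouch c c2 = false) → pvAbsorb c l seen = (c, seen)
  | [], c, seen, _ => rfl
  | c2 :: rs, c, seen, h => by
    rw [pvAbsorb, if_neg (by simp [h c2 List.mem_cons_self])]
    exact pvAbsorb_all_false rs c seen (fun c3 h3 => h c3 (List.mem_cons_of_mem _ h3))

theorem pvSetEq_refl (t : List Int) : PySem.Set.equal t t = true := by
  simp [pysem]

theorem pvPass_skip_lt : ∀ (l : List (List Int)) (seen : List (List Int)) (c : List Int),
    c ∈ l → (∃ t ∈ seen, PySem.Set.equal t c = true) → (pvPass l seen).length < l.length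
  | [], seen, c, hc, _ => by cases hc
  | c1 :: rest, seen, c, hc, hs => by
    rw [pvPass]
    by_cases hskip : (seen.any fun t => PySem.Set.equal t c1) = true
    · rw [if_pos hskip]
      exact Nat.lt_succ_of_le (pvPass_length_le rest seen)
    · rw [if_neg hskip]
      rcases List.mem_cons.1 hc with rfl | hc'
      · obtain ⟨t, ht, hteq⟩ := hs
        exact absurd (List.any_eq_true.2 ⟨t, ht, hteq⟩) hskip
      · obtain ⟨t, ht, hteq⟩ := hs
        have : t ∈ (pvAbsorb c1 rest seen).2 := pvAbsorb_seen_mono rest c1 seen t ht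
        simpa using Nat.succ_lt_succ (pvPass_skip_lt rest _ c hc' ⟨t, this, hteq⟩)

theorem pvPass_fix : ∀ (l : List (List Int)) (seen : List (List Int)),
    (pvPass l seen).length = l.length →
    pvPass l seen = l ∧ l.Pairwise (fun a b => pvTouch a b = false)
  | [], seen, _ => ⟨rfl, List.Pairwise.nil⟩
  | c1 :: rest, seen, h => by
    by_cases hskip : (seen.any fun t => PySem.Set.equal t c1) = true
    · exfalso
      rw [pvPass, if_pos hskip] at h
      have := pvPass_length_le rest seen
      simp at h
      omega
    · have hunf : pvPass (c1 :: rest) seen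
          = (pvAbsorb c1 rest seen).1 :: pvPass rest (pvAbsorb c1 rest seen).2 := by
        rw [pvPass, if_neg hskip]
      rw [hunf] at h ⊢
      simp only [List.length_cons, Nat.succ.injEq] at h
      rcases pvAbsorb_cases rest c1 seen with hall | ⟨c2, hc2, hm⟩
      · rw [pvAbsorb_all_false rest c1 seen hall] at h ⊢
        obtain ⟨he, hpw⟩ := pvPass_fix rest seen h
        exact ⟨by rw [he], List.pairwise_cons.2 ⟨hall, hpw⟩⟩
      · exfalso
        have := pvPass_skip_lt rest (pvAbsorb c1 rest seen).2 c2 hc2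
          ⟨c2, hm, pvSetEq_refl c2⟩
        omega

theorem pvTouch_false_not (a b : List Int) (h : pvTouch a b = false) : ¬ pvTouchP a b := by
  rintro ⟨x, hx1, hx2⟩
  have : pvTouch a b = true := (pvTouch_iff a b).2 ⟨x, hx2, hx1⟩
  rw [h] at this; cases this

-- ----- A-side: the while-loop -----
theorem pvLoop_spec {cs : List (List Int)} : ∀ (n : Nat) (E : List (List Nat × List Int)),
    E.length ≤ n →
    (∀ p ∈ E, pvWF cs p) → ((E.map pvKey).Pairwise (· < ·)) →
    pvCovers cs E → pvMinKeep cs E →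
    ∃ G : List (List Nat × List Int),
      pvLoop (E.map Prod.snd) = G.map Prod.snd ∧ pvState cs G ∧ pvSatd G := by
  intro n
  induction n with
  | zero =>
    intro E hlen hWF hpw hcov hmk
    have : E = [] := List.eq_nil_of_length_eq_zero (Nat.le_zero.1 hlen)
    subst this
    refine ⟨[], ?_, ⟨⟨by simp, List.Pairwise.nil⟩, hcov, hmk⟩, List.Pairwise.nil⟩
    rw [pvLoop]
    simp [pvPass]
  | succ n ih =>
    intro E hlen hWF hpw hcov hmk
    obtain ⟨G', e1, g2, g3, g4, g5⟩ :=
      pvPass_spec E [] [] (by simpa using hWF) (by simpa using hpw) (by simp)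
    simp only [List.nil_append] at g2 g3 g4 g5
    have hstate : pvState cs G' := by
      refine ⟨⟨g2, g3⟩, ?_, ?_⟩
      · intro i hi
        obtain ⟨q, hq, hqc⟩ := hcov i hi
        obtain ⟨p, hp, hpc⟩ := g4 q hq
        exact ⟨p, hp, fun x hx => hpc x (hqc x hx)⟩
      · intro i hi hmin
        obtain ⟨q, hq, hiq⟩ := hmk i hi hmin
        exact g5 q hq i hiq hmin
    by_cases hfix : (pvPass (E.map Prod.snd) []).length = (E.map Prod.snd).length
    · obtain ⟨hpe, hpu⟩ := pvPass_fix (E.map Prod.snd) [] hfix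
      refine ⟨G', ?_, hstate, ?_⟩
      · rw [pvLoop, dif_pos hfix]
        exact e1
      · have hpu' : (G'.map Prod.snd).Pairwise (fun a b => pvTouch a b = false) := by
          rw [← e1, hpe]
          exact hpu
        have := (List.pairwise_map).1 hpu'
        exact this.imp (fun h => pvTouch_false_not _ _ h)
    · have hlt : G'.length < E.length := by
        have h1 := pvPass_length_le (E.map Prod.snd) []
        rw [e1] at h1 hfix
        simp at h1 hfix
        omega
      obtain ⟨G, hG, hGs, hGsat⟩ := ih G' (by omega) g2 g3 hstate.2.1 hstate.2.2
      refine ⟨G, ?_, hGs, hGsat⟩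
      rw [pvLoop, dif_neg hfix, e1]
      exact hG

-- ----- initial ghost state -----
def pvInit (cs : List (List Int)) : List (List Nat × List Int) :=
  (List.range cs.length).map (fun i => ([i], cs.getD i []))

theorem pvInit_snd (cs : List (List Int)) : (pvInit cs).map Prod.snd = cs := by
  rw [pvInit, List.map_map]
  apply List.ext_getElem
  · simp
  · intro i h1 h2
    simp [List.getD_eq_getElem?_getD, List.getElem?_eq_getElem (by simpa using h2)]

theorem pvInit_keys (cs : List (List Int)) : (pvInit cs).map pvKey = List.range cs.length := by
  rw [pvInit, List.map_map]
  apply List.ext_getElem <;> simp [pvKey]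

theorem pvInit_WF (cs : List (List Int)) (hnd : ∀ c ∈ cs, c.Nodup) :
    ∀ p ∈ pvInit cs, pvWF cs p := by
  intro p hp
  obtain ⟨i, hi, rfl⟩ := List.mem_map.1 hp
  rw [List.mem_range] at hi
  refine ⟨by simp, by simp [pvKey], by simpa using hi, ?_, ?_, ?_⟩
  · intro a ha b hb
    rw [List.mem_singleton.1 ha, List.mem_singleton.1 hb]
    exact pvReach_refl _
  · intro x
    simp [pvOrig]
  · by_cases h : cs.getD i [] ∈ cs
    · exact hnd _ h
    · have : cs.getD i [] = cs[i] := List.getD_eq_getElem cs [] hi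
      exact absurd (this ▸ List.getElem_mem hi) h

theorem pvInit_mem (cs : List (List Int)) {i : Nat} (hi : i < cs.length) :
    ([i], cs.getD i []) ∈ pvInit cs :=
  List.mem_map.2 ⟨i, List.mem_range.2 hi, rfl⟩

theorem pvInit_cov (cs : List (List Int)) : pvCovers cs (pvInit cs) := by
  intro i hi
  exact ⟨([i], cs.getD i []), pvInit_mem cs hi, fun x hx => hx⟩

theorem pvInit_mk (cs : List (List Int)) : pvMinKeep cs (pvInit cs) := by
  intro i hi _
  exact ⟨([i], cs.getD i []), pvInit_mem cs hi, List.mem_singleton.2 rfl⟩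

-- ----- the main equivalence, pre-sort -----
theorem pvMain (cs : List (List Int)) (hnd : ∀ c ∈ cs, c.Nodup) :
    merge_circuts cs = merge_circuts_alt cs := by
  have hpwE : ((pvInit cs).map pvKey).Pairwise (· < ·) := by
    rw [pvInit_keys]
    exact List.pairwise_lt_range
  -- A's fixpoint state
  obtain ⟨GA, eA, hA, hAs⟩ := pvLoop_spec (pvInit cs).length (pvInit cs) (le_refl _)
    (pvInit_WF cs hnd) hpwE (pvInit_cov cs) (pvInit_mk cs)
  -- B's saturation state
  obtain ⟨GB, eB, b2, b3, b4, b5, b6, b7⟩ := pvSeeds_spec (pvInit cs).length (pvInit cs)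
    (le_refl _) (pvInit_WF cs hnd) hpwE
  have hB : pvState cs GB := by
    refine ⟨⟨b2, ?_⟩, ?_, ?_⟩
    · have : ((pvInit cs).map pvKey).Pairwise (· < ·) := hpwE
      exact this.sublist b3
    · intro i hi
      obtain ⟨g, hg, hig⟩ := b4 ([i], cs.getD i []) (pvInit_mem cs hi) i (List.mem_singleton.2 rfl)
      exact ⟨g, hg, fun x hx => ((b2 g hg).2.2.2.2.1 x).2 ⟨i, hig, hx⟩⟩
    · intro i hi _
      obtain ⟨g, hg, hig⟩ := b4 ([i], cs.getD i []) (pvInit_mem cs hi) i (List.mem_singleton.2 rfl)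
      exact ⟨g, hg, hig⟩
  have huniq := pvUnique hA hAs hB b7
  have eA' : pvLoop cs = GA.map Prod.snd := by rw [← pvInit_snd cs]; exact eA
  have eB' : pvSeeds cs = GB.map Prod.snd := by rw [← pvInit_snd cs]; exact eB
  rw [merge_circuts, merge_circuts_alt, eA', eB', List.map_map, List.map_map]
  exact congrArg (fun l => PySem.List.sorted l (fun x => -(x.length : Int)) false) huniq

-- ===== VERDICT (by name: the statement is the Claim_ definition above) =====
theorem merge_circuts_spec : Claim_equal_merge_circuts := by
  intro circuits _ hpre
  show merge_circuts circuits = merge_circuts_alt circuits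
  exact pvMain circuits hpre
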